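-- pv_equiv track=rewrite | github.com/pyaichatbot/ie | arch_parser_graph_builder.py | _choose_best_node_name
-- ===== SOURCE A (Python) =====
-- from typing import List, Dict, Tuple, Optional, Set, Any
--
-- def _choose_best_node_name(names: List[str]) -> str:
--     """Choose the most descriptive name from a list"""
--     if not names:
--         return "Unknown"
--
--     # Remove duplicates while preserving order
--     unique_names = list(dict.fromkeys(names))
--
--     # Prefer longer, more descriptive names
--     # But avoid overly long concatenations
--     best_name = max(unique_names, key=len)
--
--     # If the best name is too long, try to find a good shorter one
--     if len(best_name) > 50:
--         shorter_names = [name for name in unique_names if len(name) <= 30]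
--         if shorter_names:
--             best_name = max(shorter_names, key=len)
--
--     return best_name
-- ===== SOURCE B (Python) =====
-- from typing import List
--
-- def _choose_best_node_name(names: List[str]) -> str:
--     """Choose the most descriptive name: rank names by length (stable sort) and pick."""
--     if not names:
--         return "Unknown"
--     ranked = sorted(names, key=len, reverse=True)
--     best = ranked[0]
--     if len(best) > 50:
--         for name in ranked:
--             if len(name) <= 30:
--                 return name
--     return best
-- ===== Notes on version B (the rewrite author's own statement) =====
-- stated objective: alternative
-- what changed: Replaces A's dedup-list construction plus two max() scans and a filtered list comprehension by ranking the names once with a stable descending sort by length (sorted(key=len, reverse=True)): the head of the ranking is the best name and the first ranked name of length <= 30 is the short fallback; stability reproduces max()'s first-occurrence tie-breaking, and dedup is dropped since duplicates never strictly beat their first occurrence.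
import Mathlib
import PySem

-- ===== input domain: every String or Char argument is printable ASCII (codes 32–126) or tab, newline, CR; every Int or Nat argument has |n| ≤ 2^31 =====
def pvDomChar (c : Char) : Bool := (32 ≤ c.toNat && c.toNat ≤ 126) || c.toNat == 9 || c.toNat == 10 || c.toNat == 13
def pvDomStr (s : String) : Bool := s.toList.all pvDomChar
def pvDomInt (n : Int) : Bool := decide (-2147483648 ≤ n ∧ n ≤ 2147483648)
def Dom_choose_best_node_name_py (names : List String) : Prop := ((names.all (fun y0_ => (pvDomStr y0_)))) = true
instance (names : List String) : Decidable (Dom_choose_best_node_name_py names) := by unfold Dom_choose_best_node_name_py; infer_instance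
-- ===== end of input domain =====

-- B ranks the names once by a stable descending length sort and picks from the ranking,
-- instead of A's dedup list plus two max() scans and a filter (objective: alternative).

-- ===== PORT A =====
def choose_best_node_name_py (names : List String) : String :=
  if names = [] then "Unknown"
  else
    let unique_names := PySem.List.dedup names
    let best_name := (PySem.List.max? unique_names (fun n => PySem.Str.len n)).getD "Unknown"
    if PySem.Str.len best_name > 50 then
      let shorter_names := unique_names.filter (fun n => PySem.Str.len n ≤ 30)
      if shorter_names ≠ [] then
        (PySem.List.max? shorter_names (fun n => PySem.Str.len n)).getD best_name
      else best_name
    else best_name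

-- ===== PORT B =====
-- sorted(names, key=len, reverse=True); ranked[0]; the for-loop with early return is find?
def choose_best_node_name_py_alt (names : List String) : String :=
  if names = [] then "Unknown"
  else
    match PySem.List.sorted names (fun n => PySem.Str.len n) true with
    | [] => "Unknown"  -- unreachable: names ≠ []
    | best :: rest =>
      if PySem.Str.len best > 50 then
        match (best :: rest).find? (fun n => PySem.Str.len n ≤ 30) with
        | some n => n
        | none => best
      else best

-- ===== PRECONDITION & SPEC =====
def Spec_choose_best_node_name_py (names : List String) (out : String) : Prop := out = choose_best_node_name_py_alt names
instance (names : List String) (out : String) : Decidable (Spec_choose_best_node_name_py names out) := by unfold Spec_choose_best_node_name_py; infer_instance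

-- ===== CLAIM (what is proved, stated in full; the proofs are below) =====
def Claim_equal_choose_best_node_name_py : Prop := ∀ (names : List String), Dom_choose_best_node_name_py names → Spec_choose_best_node_name_py names (choose_best_node_name_py names)

-- ===== LEMMAS AND PROOFS =====

-- the running-maximum step (identical to the step inside PySem.List.max? for key = Str.len)
def mstep (acc : Option String) (x : String) : Option String :=
  match acc with
  | none => some x
  | some m => if PySem.Str.len m < PySem.Str.len x then some x else some m

def mfold (acc : Option String) (l : List String) : Option String := l.foldl mstep acc

lemma max?_eq_mfold (l : List String) :
    PySem.List.max? l (fun n => PySem.Str.len n) = mfold none l := by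
  unfold PySem.List.max? mfold
  congr 1
  funext acc x
  cases acc <;> rfl

-- monotone: folding from `some a` yields some m with len a ≤ len m
lemma mfold_some (l : List String) (a : String) :
    ∃ m, mfold (some a) l = some m ∧ PySem.Str.len a ≤ PySem.Str.len m := by
  induction l generalizing a with
  | nil => exact ⟨a, rfl, le_refl _⟩
  | cons x t ih =>
    simp only [mfold, List.foldl_cons, mstep]
    split_ifs with h
    · obtain ⟨m, hm, hle⟩ := ih x
      exact ⟨m, hm, le_trans (le_of_lt h) hle⟩
    · exact ih a

-- every member of l is dominated by the fold result
lemma mfold_dominates (l : List String) : ∀ (acc : Option String) (x : String), x ∈ l →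
    ∃ m, mfold acc l = some m ∧ PySem.Str.len x ≤ PySem.Str.len m := by
  induction l with
  | nil => intro _ _ hx; cases hx
  | cons y t ih =>
    intro acc x hx
    rcases List.mem_cons.mp hx with rfl | hxt
    · have : ∃ b, mstep acc x = some b ∧ PySem.Str.len x ≤ PySem.Str.len b := by
        cases acc with
        | none => exact ⟨x, rfl, le_refl _⟩
        | some m =>
          simp only [mstep]
          split_ifs with h
          · exact ⟨x, rfl, le_refl _⟩
          · exact ⟨m, rfl, le_of_not_gt h⟩
      obtain ⟨b, hb, hxb⟩ := this
      obtain ⟨m, hm, hbm⟩ := mfold_some t b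
      refine ⟨m, ?_, le_trans hxb hbm⟩
      simpa [mfold, hb] using hm
    · exact ih _ x hxt

-- a dominated duplicate does not move the accumulator
lemma mstep_mem (s : List String) (acc : Option String) (x : String) (hx : x ∈ s) :
    mstep (mfold acc s) x = mfold acc s := by
  obtain ⟨m, hm, hle⟩ := mfold_dominates s acc x hx
  rw [hm]
  show (if PySem.Str.len m < PySem.Str.len x then some x else some m) = some m
  rw [if_neg (not_lt.mpr hle)]

-- dedup does not change the running maximum
lemma mfold_ofList (l : List String) : ∀ s : List String,
    mfold none (List.foldl PySem.Set.add s l) = mfold (mfold none s) l := by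
  induction l with
  | nil => intro s; rfl
  | cons x t ih =>
    intro s
    show mfold none (List.foldl PySem.Set.add (PySem.Set.add s x) t)
        = mfold (mstep (mfold none s) x) t
    by_cases hmem : x ∈ s
    · rw [show PySem.Set.add s x = s by simp [PySem.Set.add, hmem],
          mstep_mem s none x hmem]
      exact ih s
    · have hadd : PySem.Set.add s x = s ++ [x] := by simp [PySem.Set.add, hmem]
      rw [hadd, ih (s ++ [x])]
      congr 1
      simp only [mfold, List.foldl_append, List.foldl_cons, List.foldl_nil]

lemma max?_dedup (l : List String) :
    PySem.List.max? (PySem.List.dedup l) (fun n => PySem.Str.len n)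
      = PySem.List.max? l (fun n => PySem.Str.len n) := by
  have h := mfold_ofList l []
  rw [max?_eq_mfold, max?_eq_mfold]
  exact h

-- filter commutes with ofList (dedup)
lemma filter_foldl_add (p : String → Bool) (l : List String) : ∀ s : List String,
    (List.foldl PySem.Set.add s l).filter p
      = List.foldl PySem.Set.add (s.filter p) (l.filter p) := by
  induction l with
  | nil => intro s; rfl
  | cons x t ih =>
    intro s
    show (List.foldl PySem.Set.add (PySem.Set.add s x) t).filter p
        = List.foldl PySem.Set.add (s.filter p) ((x :: t).filter p)
    by_cases hmem : x ∈ s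
    · have h1 : PySem.Set.add s x = s := by simp [PySem.Set.add, hmem]
      rw [h1, ih s, List.filter_cons]
      by_cases hp : p x
      · have h2 : PySem.Set.add (s.filter p) x = s.filter p := by
          simp [PySem.Set.add, List.mem_filter, hmem, hp]
        simp [hp, h2]
      · simp [hp]
    · have h1 : PySem.Set.add s x = s ++ [x] := by simp [PySem.Set.add, hmem]
      rw [h1, ih (s ++ [x]), List.filter_append, List.filter_cons]
      by_cases hp : p x
      · have h2 : PySem.Set.add (s.filter p) x = s.filter p ++ [x] := by
          have hnf : x ∉ s.filter p := fun h => hmem (List.mem_filter.mp h).1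
          simp [PySem.Set.add, hnf]
        simp [hp, h2]
      · simp [hp]

lemma dedup_filter (p : String → Bool) (l : List String) :
    (PySem.List.dedup l).filter p = PySem.List.dedup (l.filter p) := by
  have h := filter_foldl_add p l []
  simpa [PySem.List.dedup, PySem.Set.ofList, PySem.Set.empty] using h

lemma mfold_none_eq_none_iff (l : List String) : mfold none l = none ↔ l = [] := by
  cases l with
  | nil => simp [mfold]
  | cons x t =>
    constructor
    · intro h
      obtain ⟨m, hm, _⟩ := mfold_dominates (x :: t) none x (List.mem_cons_self)
      rw [hm] at h; cases h
    · intro h; cases h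

-- inserting an element the predicate rejects does not change find?
lemma find?_insertBy_neg (b : String → String → Bool) (p : String → Bool)
    (x : String) (l : List String) (hx : p x = false) :
    (PySem.List.insertBy b x l).find? p = l.find? p := by
  induction l with
  | nil => simp [PySem.List.insertBy, List.find?, hx]
  | cons y ys ih =>
    show (if b x y then x :: y :: ys else y :: PySem.List.insertBy b x ys).find? p
        = (y :: ys).find? p
    split_ifs with h
    · simp [List.find?, hx]
    · cases hy : p y <;> simp [List.find?, hy, ih]

-- inserting an accepted element into a descending-by-length list acts as mstep on find?
lemma find?_insertBy_pos (p : String → Bool) (x : String) (l : List String)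
    (hl : l.Pairwise (fun a c => PySem.Str.len c ≤ PySem.Str.len a)) (hx : p x = true) :
    (PySem.List.insertBy (fun a c => decide (PySem.Str.len c < PySem.Str.len a)) x l).find? p
      = mstep (l.find? p) x := by
  induction l with
  | nil => simp [PySem.List.insertBy, List.find?, hx, mstep]
  | cons y ys ih =>
    obtain ⟨hy, hp⟩ := List.pairwise_cons.mp hl
    show (if decide (PySem.Str.len y < PySem.Str.len x) then x :: y :: ys
          else y :: PySem.List.insertBy _ x ys).find? p = mstep ((y :: ys).find? p) x
    by_cases h : PySem.Str.len y < PySem.Str.len x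
    · rw [if_pos (by simpa using h)]
      cases hpy : p y with
      | true =>
        rw [List.find?_cons_of_pos hx, List.find?_cons_of_pos hpy]
        show some x = mstep (some y) x
        simp only [mstep]
        rw [if_pos h]
      | false =>
        rw [List.find?_cons_of_pos hx, List.find?_cons_of_neg (by simp [hpy])]
        cases hf : ys.find? p with
        | none => rfl
        | some m =>
          have hlt : PySem.Str.len m < PySem.Str.len x :=
            lt_of_le_of_lt (hy m (List.mem_of_find?_eq_some hf)) h
          show some x = mstep (some m) x
          simp only [mstep]
          rw [if_pos hlt]
    · rw [if_neg (by simpa using h)]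
      cases hpy : p y with
      | true =>
        rw [List.find?_cons_of_pos hpy, List.find?_cons_of_pos hpy]
        show some y = mstep (some y) x
        simp only [mstep]
        rw [if_neg h]
      | false =>
        rw [List.find?_cons_of_neg (by simp [hpy]), List.find?_cons_of_neg (by simp [hpy])]
        exact ih hp

-- appending one element to the input inserts it into the descending ranking
lemma sorted_rev_snoc (xs : List String) (x : String) :
    PySem.List.sorted (xs ++ [x]) (fun n => PySem.Str.len n) true
      = PySem.List.insertBy (fun a c => decide (PySem.Str.len c < PySem.Str.len a)) x
          (PySem.List.sorted xs (fun n => PySem.Str.len n) true) := by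
  rw [PySem.List.sorted_rev_eq_foldl_insertBy, PySem.List.sorted_rev_eq_foldl_insertBy,
    List.foldl_append]
  rfl

-- the first ranked name accepted by p is the running maximum of the accepted names
lemma find?_sorted_rev (p : String → Bool) (xs : List String) :
    (PySem.List.sorted xs (fun n => PySem.Str.len n) true).find? p
      = mfold none (xs.filter p) := by
  induction xs using List.reverseRecOn with
  | nil => rfl
  | append_singleton xs x ih =>
    rw [sorted_rev_snoc, List.filter_append]
    cases hx : p x with
    | false =>
      rw [find?_insertBy_neg _ p x _ hx, ih]
      simp [hx]
    | true =>
      rw [find?_insertBy_pos p x _ (PySem.List.sorted_pairwise_rev xs _) hx, ih]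
      simp only [List.filter_cons, hx, List.filter_nil, mfold, List.foldl_append,
        List.foldl_cons, List.foldl_nil, if_pos]

-- the head of the ranking is the running maximum of all names
lemma head?_sorted_rev (xs : List String) :
    (PySem.List.sorted xs (fun n => PySem.Str.len n) true).head? = mfold none xs := by
  have h := find?_sorted_rev (fun _ => true) xs
  simp only [List.filter_true] at h
  rw [← h]
  cases PySem.List.sorted xs (fun n => PySem.Str.len n) true <;> simp [List.find?]

-- ===== VERDICT (by name: the statement is the Claim_ definition above) =====
theorem choose_best_node_name_py_spec : Claim_equal_choose_best_node_name_py := by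
  intro names _
  show choose_best_node_name_py names = choose_best_node_name_py_alt names
  unfold choose_best_node_name_py choose_best_node_name_py_alt
  by_cases hnil : names = []
  · subst hnil; rfl
  · rw [if_neg hnil, if_neg hnil]
    have hA : PySem.List.max? (PySem.List.dedup names) (fun n => PySem.Str.len n)
        = mfold none names := by rw [max?_dedup, max?_eq_mfold]
    have hBS : mfold none (names.filter (fun n => PySem.Str.len n ≤ 30))
        = PySem.List.max? ((PySem.List.dedup names).filter (fun n => PySem.Str.len n ≤ 30))
            (fun n => PySem.Str.len n) := by
      rw [dedup_filter, max?_eq_mfold]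
      exact (mfold_ofList (names.filter (fun n => PySem.Str.len n ≤ 30)) []).symm
    cases hs : PySem.List.sorted names (fun n => PySem.Str.len n) true with
    | nil => exact absurd ((PySem.List.sorted_eq_nil_iff names _ true).mp hs) hnil
    | cons best rest =>
      have hhead : mfold none names = some best := by
        rw [← head?_sorted_rev, hs]; rfl
      simp only [hA, hhead, Option.getD_some]
      by_cases h50 : PySem.Str.len best > 50
      · rw [if_pos h50, if_pos h50]
        have hfind : (best :: rest).find? (fun n => PySem.Str.len n ≤ 30)
            = mfold none (names.filter (fun n => PySem.Str.len n ≤ 30)) := by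
          rw [← hs, find?_sorted_rev]
        cases hbs : mfold none (names.filter (fun n => PySem.Str.len n ≤ 30)) with
        | none =>
          have h0 : names.filter (fun n => PySem.Str.len n ≤ 30) = [] :=
            (mfold_none_eq_none_iff _).mp hbs
          have hempty : (PySem.List.dedup names).filter (fun n => PySem.Str.len n ≤ 30) = [] := by
            rw [dedup_filter, h0]; rfl
          rw [if_neg (by simpa using hempty), hfind, hbs]
        | some s =>
          have hne : (PySem.List.dedup names).filter (fun n => PySem.Str.len n ≤ 30) ≠ [] := by
            intro h
            rw [dedup_filter] at h
            have : names.filter (fun n => PySem.Str.len n ≤ 30) = [] := by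
              by_contra hne'
              obtain ⟨y, hy⟩ := List.exists_mem_of_ne_nil _ hne'
              have : y ∈ PySem.List.dedup (names.filter (fun n => PySem.Str.len n ≤ 30)) := by
                rw [PySem.List.mem_dedup]; exact hy
              rw [h] at this; cases this
            rw [this] at hbs; cases hbs
          rw [if_pos hne, ← hBS, hbs, Option.getD_some, hfind, hbs]
      · rw [if_neg h50, if_neg h50]
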